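-- pv_equiv track=rewrite | github.com/Alexia-Claudia-Micu/UBB | 1stSemester/FP/a1-915-Micu-AlexiaClaudia/p3.py | solve
-- ===== SOURCE A (Python) =====
-- def solve ( n ):
--     k=1
--     x=1
--     while k < n:
--         d=2
--         aux=x
--         x += 1
--         while aux != 1 and k < n:
--             if aux % d == 0:
--                 k += 1
--                 while aux % d == 0:
--                     aux //= d
--             d += 1
--     return d-1
-- ===== SOURCE B (Python) =====
-- def _dpf(x):
--     """Distinct prime factors of x in increasing order (trial division to sqrt)."""
--     fs = []
--     d = 2
--     while d * d <= x:
--         if x % d == 0: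
--             fs.append(d)
--             while x % d == 0:
--                 x //= d
--         d += 1
--     if x > 1:
--         fs.append(x)
--     return fs
--
-- def solve(n):
--     need = n - 1
--     x = 2
--     while True:
--         fs = _dpf(x)
--         if need <= len(fs):
--             return fs[need - 1]
--         need -= len(fs)
--         x += 1
-- ===== Notes on version B (the rewrite author's own statement) =====
-- stated objective: faster
-- what changed: A trial-divides each number x by every d up to x's largest prime factor itself, counting one global prime at a time; B computes per number the complete list of its distinct prime factors by trial division only up to the square root (with the leftover cofactor appended), then consumes that list against a remaining-count 'need', returning by index when the list covers it.
-- outside the precondition, e.g. on solve(1): A raises UnboundLocalError, B returns 2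
import Mathlib
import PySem

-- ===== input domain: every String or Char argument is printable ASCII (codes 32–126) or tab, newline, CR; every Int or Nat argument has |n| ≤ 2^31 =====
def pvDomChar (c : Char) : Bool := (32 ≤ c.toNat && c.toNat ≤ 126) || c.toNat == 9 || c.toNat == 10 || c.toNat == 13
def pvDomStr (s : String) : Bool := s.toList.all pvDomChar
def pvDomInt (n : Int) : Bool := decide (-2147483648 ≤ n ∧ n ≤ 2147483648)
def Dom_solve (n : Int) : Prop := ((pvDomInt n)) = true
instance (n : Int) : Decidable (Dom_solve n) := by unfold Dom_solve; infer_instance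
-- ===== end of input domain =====

-- B replaces A's prime-at-a-time scan (trial division of each x up to its largest prime factor)
-- by computing, per number, the whole list of its distinct prime factors with trial division only
-- up to the square root, then consuming that list against a remaining count; asymptotically faster.
-- All loop variables are positive in Python, so the ports work on Nat; every `fuel` below is a
-- totality guard only, always large enough for the loop it transcribes (proved in the lemmas).

-- ===== PORT A =====
-- `while aux % d == 0: aux //= d`; aux strictly decreases, so fuel = initial aux suffices
def divAllF (fuel aux d : Nat) : Nat :=
  match fuel with
  | 0 => aux
  | f + 1 => if aux % d = 0 ∧ 2 ≤ d ∧ 1 ≤ aux then divAllF f (aux / d) d else aux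

def divAll (aux d : Nat) : Nat := divAllF aux aux d

-- A's inner `while aux != 1 and k < n:` loop; returns (d, k) at loop exit
def innerAF (fuel n k d aux : Nat) : Nat × Nat :=
  match fuel with
  | 0 => (d, k)
  | f + 1 =>
    if aux ≠ 1 ∧ k < n then
      if aux % d = 0 then innerAF f n (k + 1) (d + 1) (divAll aux d)
      else innerAF f n k (d + 1) aux
    else (d, k)

-- A's outer `while k < n:` loop, returning `d - 1` at exit
def outerA (n k x fuel : Nat) : Nat :=
  match fuel with
  | 0 => 0
  | f + 1 =>
    if k < n then
      let r := innerAF (2 * x + 1) n k 2 x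
      if r.2 < n then outerA n r.2 (x + 1) f else r.1 - 1
    else 0

-- On n ≤ 1 the Python A raises UnboundLocalError (d unbound); the port returns 0 there (outside Pre_).
def solve (n : Int) : Int := Int.ofNat (outerA n.toNat 1 1 (2 * n.toNat + 5))

-- ===== PORT B =====
-- B's `while x % d == 0: x //= d`; same shape as its Python, fuel = initial x suffices
def stripB : Nat → Nat → Nat → Nat
  | 0, x, _ => x
  | f + 1, x, d => if x % d = 0 ∧ 2 ≤ d ∧ 1 ≤ x then stripB f (x / d) d else x

-- B's `_dpf` loop: accumulates the distinct prime factors of x in increasing order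
def dpfF (fuel d x : Nat) (fs : List Nat) : List Nat :=
  match fuel with
  | 0 => fs
  | f + 1 =>
    if d * d ≤ x then
      if x % d = 0 then dpfF f (d + 1) (stripB x x d) (fs ++ [d])
      else dpfF f (d + 1) x fs
    else if 1 < x then fs ++ [x] else fs

def dpf (x : Nat) : List Nat := dpfF (2 * x + 1) 2 x []

-- B's `while True:` loop over need/x; `fs[need-1]` ported as getD (inside Pre_, 1 ≤ need ≤ len fs)
def loopB (need x fuel : Nat) : Nat :=
  match fuel with
  | 0 => 0
  | f + 1 =>
    let fs := dpf x
    if need ≤ fs.length then fs.getD (need - 1) 0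
    else loopB (need - fs.length) (x + 1) f

def solve_alt (n : Int) : Int := Int.ofNat (loopB (n.toNat - 1) 2 (2 * n.toNat + 4))

-- ===== PRECONDITION & SPEC =====
-- Pre_ excludes exactly n ≤ 1, where Python A raises UnboundLocalError (d is never assigned).
def Pre_solve (n : Int) : Prop := 2 ≤ n
instance (n : Int) : Decidable (Pre_solve n) := by unfold Pre_solve; infer_instance
def pvWitness_solve : Int := 5

def Spec_solve (n : Int) (out : Int) : Prop := out = solve_alt n
instance (n : Int) (out : Int) : Decidable (Spec_solve n out) := by unfold Spec_solve; infer_instance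

-- ===== CLAIM (what is proved, stated in full; the proofs are below) =====
def Claim_equal_solve : Prop := ∀ (n : Int), Dom_solve n → Pre_solve n → Spec_solve n (solve n)

-- ===== LEMMAS AND PROOFS =====

theorem stripB_eq_divAllF (fuel : Nat) : ∀ x d, stripB fuel x d = divAllF fuel x d := by
  induction fuel with
  | zero => intro x d; rfl
  | succ f ih =>
    intro x d
    rw [stripB, divAllF]
    split_ifs with h
    · exact ih (x / d) d
    · rfl

theorem stripB_eq_divAll (x d : Nat) : stripB x x d = divAll x d := stripB_eq_divAllF x x d

theorem divAllF_le (fuel : Nat) : ∀ aux d, divAllF fuel aux d ≤ aux := by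
  induction fuel with
  | zero => intro aux d; exact le_refl _
  | succ f ih =>
    intro aux d
    rw [divAllF]
    split_ifs with h
    · exact le_trans (ih (aux / d) d) (Nat.div_le_self _ _)
    · exact le_refl _

theorem divAllF_dvd (fuel : Nat) : ∀ aux d, divAllF fuel aux d ∣ aux := by
  induction fuel with
  | zero => intro aux d; exact dvd_refl _
  | succ f ih =>
    intro aux d
    rw [divAllF]
    split_ifs with h
    · exact dvd_trans (ih (aux / d) d)
        (Nat.div_dvd_of_dvd (Nat.dvd_of_mod_eq_zero h.1))
    · exact dvd_refl _

theorem divAll_dvd (aux d : Nat) : divAll aux d ∣ aux := divAllF_dvd aux aux d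

theorem divAllF_pos (fuel : Nat) : ∀ aux d, 1 ≤ aux → 1 ≤ divAllF fuel aux d := by
  induction fuel with
  | zero => intro aux d h; exact h
  | succ f ih =>
    intro aux d h
    rw [divAllF]
    split_ifs with hg
    · have hdvd : d ∣ aux := Nat.dvd_of_mod_eq_zero hg.1
      have : d ≤ aux := Nat.le_of_dvd (by omega) hdvd
      exact ih (aux / d) d ((Nat.one_le_div_iff (by omega)).2 this)
    · exact h

theorem divAll_pos (aux d : Nat) (h : 1 ≤ aux) : 1 ≤ divAll aux d := divAllF_pos aux aux d h

theorem divAllF_not_dvd (fuel : Nat) :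
    ∀ aux d, aux ≤ fuel → 2 ≤ d → 1 ≤ aux → ¬ d ∣ divAllF fuel aux d := by
  induction fuel with
  | zero => intro aux d hf _ h1; omega
  | succ f ih =>
    intro aux d hf hd h1
    rw [divAllF]
    split_ifs with hg
    · have hdvd : d ∣ aux := Nat.dvd_of_mod_eq_zero hg.1
      have hda : d ≤ aux := Nat.le_of_dvd (by omega) hdvd
      have hlt : aux / d < aux := Nat.div_lt_self (by omega) (by omega)
      exact ih (aux / d) d (by omega) hd ((Nat.one_le_div_iff (by omega)).2 hda)
    · intro hdvd
      exact hg ⟨Nat.dvd_iff_mod_eq_zero.mp hdvd, hd, h1⟩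

theorem not_dvd_divAll (aux d : Nat) (hd : 2 ≤ d) (h : 1 ≤ aux) : ¬ d ∣ divAll aux d :=
  divAllF_not_dvd aux aux d (le_refl _) hd h

theorem divAllF_one (fuel d : Nat) (hd : 2 ≤ d) : divAllF fuel 1 d = 1 := by
  cases fuel with
  | zero => rfl
  | succ f =>
    rw [divAllF, if_neg]
    intro hg
    rw [Nat.mod_eq_of_lt (by omega)] at hg
    omega

theorem divAll_self (aux : Nat) (h : 2 ≤ aux) : divAll aux aux = 1 := by
  unfold divAll
  obtain ⟨f, rfl⟩ : ∃ f, aux = f + 1 := ⟨aux - 1, by omega⟩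
  rw [divAllF, if_pos ⟨Nat.mod_self _, h, by omega⟩, Nat.div_self (by omega)]
  exact divAllF_one f (f + 1) h

theorem divAll_le_div (aux d : Nat) (h2 : 2 ≤ d) (hm : aux % d = 0) (hp : 1 ≤ aux) :
    divAll aux d ≤ aux / d := by
  unfold divAll
  obtain ⟨f, rfl⟩ : ∃ f, aux = f + 1 := ⟨aux - 1, by omega⟩
  rw [divAllF, if_pos ⟨hm, h2, hp⟩]
  exact divAllF_le f _ d

theorem innerAF_one (fuel n k d : Nat) : innerAF fuel n k d 1 = (d, k) := by
  cases fuel with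
  | zero => rfl
  | succ f => rw [innerAF, if_neg (by simp)]

theorem innerAF_exit (fuel n k d aux : Nat) (h : ¬ (aux ≠ 1 ∧ k < n)) :
    innerAF fuel n k d aux = (d, k) := by
  cases fuel with
  | zero => rfl
  | succ f => rw [innerAF, if_neg h]

-- accumulator lemma: dpfF appends to its accumulator
theorem dpfF_acc (fuel : Nat) : ∀ d x acc, dpfF fuel d x acc = acc ++ dpfF fuel d x [] := by
  induction fuel with
  | zero => intro d x acc; simp [dpfF]
  | succ f ih =>
    intro d x acc
    rw [dpfF, dpfF]
    split_ifs with h1 h2 h3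
    · rw [ih (d + 1) (stripB x x d) (acc ++ [d]), ih (d + 1) (stripB x x d) ([] ++ [d])]
      simp
    · rw [ih (d + 1) x acc]
    · simp
    · simp

-- when d itself is the last remaining factor, one step finishes A's loop
theorem innerA_last (fuel n k aux : Nat) (hfu : 1 ≤ fuel) (hk : k < n) (h2 : 2 ≤ aux) :
    innerAF fuel n k aux aux = (aux + 1, k + 1) := by
  obtain ⟨f, rfl⟩ : ∃ f, fuel = f + 1 := ⟨fuel - 1, by omega⟩
  rw [innerAF, if_pos ⟨by omega, hk⟩, if_pos (Nat.mod_self aux), divAll_self aux h2]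
  exact innerAF_one f n (k + 1) (aux + 1)

-- A's scan from d, with no divisor of aux below d and d*d > aux > 1, finds only aux itself.
theorem scanA (n k : Nat) (hk : k < n) :
    ∀ fuel d aux, aux - d < fuel → 2 ≤ d → d ≤ aux →
      (∀ e, 2 ≤ e → e < d → ¬ e ∣ aux) → aux < d * d →
      innerAF fuel n k d aux = (aux + 1, k + 1) := by
  intro fuel
  induction fuel with
  | zero => intro d aux hf _ _ _ _; omega
  | succ f ih =>
    intro d aux hf h2 hda hinv hsq
    rcases eq_or_lt_of_le hda with heq | hlt
    · subst heq; exact innerA_last (f + 1) n k d (by omega) hk (by omega)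
    · have hmod : ¬ aux % d = 0 := by
        intro hmod
        rcases Nat.dvd_of_mod_eq_zero hmod with ⟨c, rfl⟩
        have hc2 : 2 ≤ c := by
          rcases Nat.lt_or_ge c 2 with hc | hc
          · interval_cases c <;> omega
          · exact hc
        have hcd : c < d := Nat.lt_of_mul_lt_mul_left (a := d) hsq
        exact hinv c hc2 hcd (dvd_mul_left c d)
      rw [innerAF, if_pos ⟨by omega, hk⟩, if_neg hmod]
      refine ih (d + 1) aux (by omega) (by omega) (by omega) ?_ ?_
      · intro e he1 he2 hdvd
        rcases Nat.lt_or_ge e d with h | h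
        · exact hinv e he1 h hdvd
        · have : e = d := by omega
          subst this
          exact hmod (Nat.dvd_iff_mod_eq_zero.mp hdvd)
      · calc aux < d * d := hsq
          _ ≤ (d + 1) * (d + 1) := Nat.mul_le_mul (by omega) (by omega)

-- Key bisimulation: A's inner loop result is determined by B's factor list from the same state.
theorem inner_eq (n : Nat) :
    ∀ m aux d k fa fb, 2 * aux - d ≤ m → 2 * aux - d < fa → 2 * aux - d < fb →
      1 ≤ aux → 2 ≤ d → k < n → (∀ e, 2 ≤ e → e < d → ¬ e ∣ aux) →
      ((n - k ≤ (dpfF fb d aux []).length →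
          innerAF fa n k d aux = ((dpfF fb d aux []).getD (n - k - 1) 0 + 1, n)) ∧
       ((dpfF fb d aux []).length < n - k →
          (innerAF fa n k d aux).2 = k + (dpfF fb d aux []).length)) := by
  intro m
  induction m with
  | zero =>
    intro aux d k fa fb hm hfa hfb h1 h2 hk hinv
    rcases Nat.lt_or_ge aux 2 with haux | haux
    · have hax : aux = 1 := by omega
      subst hax
      obtain ⟨gb, rfl⟩ : ∃ g, fb = g + 1 := ⟨fb - 1, by omega⟩
      rw [dpfF, if_neg (fun hc => by have := Nat.mul_le_mul h2 h2; omega), if_neg (by omega),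
          innerAF_one]
      exact ⟨fun hle => by simp at hle; omega, fun _ => by simp⟩
    · exact absurd (hinv aux haux (by omega) (dvd_refl aux)) (by simp)
  | succ m ih =>
    intro aux d k fa fb hm hfa hfb h1 h2 hk hinv
    obtain ⟨ga, rfl⟩ : ∃ g, fa = g + 1 := ⟨fa - 1, by omega⟩
    obtain ⟨gb, rfl⟩ : ∃ g, fb = g + 1 := ⟨fb - 1, by omega⟩
    by_cases hloop : d * d ≤ aux
    · have h44 : 2 * 2 ≤ d * d := Nat.mul_le_mul h2 h2
      have hda : d ≤ aux := le_trans (Nat.le_mul_of_pos_left d (by omega)) hloop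
      by_cases hmod : aux % d = 0
      · have hstepA : innerAF (ga + 1) n k d aux = innerAF ga n (k + 1) (d + 1) (divAll aux d) := by
          rw [innerAF, if_pos ⟨by omega, hk⟩, if_pos hmod]
        have hstepB : dpfF (gb + 1) d aux [] = d :: dpfF gb (d + 1) (divAll aux d) [] := by
          rw [dpfF, if_pos hloop, if_pos hmod, stripB_eq_divAll, dpfF_acc]
          simp
        have hmeaslt : 2 * divAll aux d - (d + 1) < 2 * aux - d := by
          have ha : divAll aux d ≤ aux / d := divAll_le_div aux d h2 hmod (by omega)
          have hb : aux / d ≤ aux / 2 := Nat.div_le_div_left h2 (by omega)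
          have hc : 2 * (aux / 2) ≤ aux := Nat.mul_div_le aux 2
          omega
        by_cases hkn : k + 1 = n
        · rw [hstepA, hstepB]
          constructor
          · intro _
            have : n - k - 1 = 0 := by omega
            rw [this, innerAF_exit _ _ _ _ _ (by omega)]
            simp
            omega
          · intro hlt
            simp at hlt
            omega
        · have hinv' : ∀ e, 2 ≤ e → e < d + 1 → ¬ e ∣ divAll aux d := by
            intro e he1 he2 hdvd
            rcases Nat.lt_or_ge e d with h | h
            · exact hinv e he1 h (dvd_trans hdvd (divAll_dvd aux d))
            · have : e = d := by omega
              subst this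
              exact not_dvd_divAll aux e he1 (by omega) hdvd
          have hrec := ih (divAll aux d) (d + 1) (k + 1) ga gb (by omega) (by omega) (by omega)
            (divAll_pos aux d (by omega)) (by omega) (by omega) hinv'
          rw [hstepA, hstepB]
          constructor
          · intro hle
            simp only [List.length_cons] at hle
            have h1le : n - (k + 1) ≤ (dpfF gb (d + 1) (divAll aux d) []).length := by omega
            rw [hrec.1 h1le]
            obtain ⟨j, hj⟩ : ∃ j, n - k - 1 = j + 1 := ⟨n - k - 2, by omega⟩
            have hji : n - (k + 1) - 1 = j := by omega
            rw [hji, hj]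
            simp only [List.getD_cons_succ]
          · intro hlt
            simp only [List.length_cons] at hlt ⊢
            rw [hrec.2 (by omega)]
            omega
      · have hstepA : innerAF (ga + 1) n k d aux = innerAF ga n k (d + 1) aux := by
          rw [innerAF, if_pos ⟨by omega, hk⟩, if_neg hmod]
        have hstepB : dpfF (gb + 1) d aux [] = dpfF gb (d + 1) aux [] := by
          rw [dpfF, if_pos hloop, if_neg hmod]
        have hinv' : ∀ e, 2 ≤ e → e < d + 1 → ¬ e ∣ aux := by
          intro e he1 he2 hdvd
          rcases Nat.lt_or_ge e d with h | h
          · exact hinv e he1 h hdvd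
          · have : e = d := by omega
            subst this
            exact hmod (Nat.dvd_iff_mod_eq_zero.mp hdvd)
        have hrec := ih aux (d + 1) k ga gb (by omega) (by omega) (by omega) h1 (by omega) hk hinv'
        rw [hstepA, hstepB]
        exact hrec
    · rcases Nat.lt_or_ge aux 2 with haux | haux
      · have hax : aux = 1 := by omega
        subst hax
        rw [dpfF, if_neg hloop, if_neg (by omega), innerAF_one]
        exact ⟨fun hle => by simp at hle; omega, fun _ => by simp⟩
      · have hda : d ≤ aux := by
          by_contra hcon
          exact hinv aux haux (by omega) (dvd_refl aux)
        have hstepB : dpfF (gb + 1) d aux [] = [aux] := by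
          rw [dpfF, if_neg hloop, if_pos (by omega)]
          simp
        have hscan : innerAF (ga + 1) n k d aux = (aux + 1, k + 1) :=
          scanA n k hk (ga + 1) d aux (by omega) h2 hda hinv (by omega)
        rw [hstepB, hscan]
        constructor
        · intro hle
          simp only [List.length_cons, List.length_nil] at hle
          have hkn : k + 1 = n := by omega
          have : n - k - 1 = 0 := by omega
          rw [this, hkn]
          simp
        · intro hlt
          simp

-- A's outer loop from (k, x) equals B's loop on (need = n - k, x), same fuel.
theorem outer_eq (n : Nat) : ∀ f k x, k < n → 1 ≤ x → outerA n k x f = loopB (n - k) x f := by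
  intro f
  induction f with
  | zero => intro k x _ _; rfl
  | succ f ih =>
    intro k x hk hx
    simp only [outerA, loopB, if_pos hk]
    have hdx : dpf x = dpfF (2 * x + 1) 2 x [] := rfl
    rw [hdx]
    have hrec := inner_eq n (2 * x) x 2 k (2 * x + 1) (2 * x + 1)
      (by omega) (by omega) (by omega) hx (by omega) hk (by intro e he1 he2 _; omega)
    by_cases hle : n - k ≤ (dpfF (2 * x + 1) 2 x []).length
    · rw [if_pos hle, hrec.1 hle]
      simp
    · rw [if_neg hle]
      have hA := hrec.2 (by omega)
      rw [hA, if_pos (by omega), ih (k + (dpfF (2 * x + 1) 2 x []).length) (x + 1) (by omega) (by omega)]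
      congr 1
      omega

-- ===== VERDICT (by name: the statement is the Claim_ definition above) =====
theorem solve_spec : Claim_equal_solve := by
  intro n _ hpre
  unfold Spec_solve solve solve_alt
  have hN : 2 ≤ n.toNat := by unfold Pre_solve at hpre; omega
  congr 1
  have h1 : innerAF (2 * 1 + 1) n.toNat 1 2 1 = (2, 1) := innerAF_one _ _ _ _
  have e1 : outerA n.toNat 1 1 (2 * n.toNat + 5) =
      (if 1 < n.toNat then
        (if (innerAF (2 * 1 + 1) n.toNat 1 2 1).2 < n.toNat then
          outerA n.toNat (innerAF (2 * 1 + 1) n.toNat 1 2 1).2 (1 + 1) (2 * n.toNat + 4)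
        else (innerAF (2 * 1 + 1) n.toNat 1 2 1).1 - 1)
      else 0) := rfl
  rw [e1, if_pos (by omega), h1]
  simp only
  rw [if_pos (by omega)]
  have := outer_eq n.toNat (2 * n.toNat + 4) 1 2 (by omega) (by omega)
  simpa using this
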